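-- pv_equiv track=rewrite | github.com/LakovskyR/TennisBet | src/wta_backfill.py | _build_lastname_index
-- ===== SOURCE A (Python) =====
-- def _build_lastname_index(player_pool: list[str], name_to_id: dict[str, str]) -> dict[str, list[tuple[str, str]]]:
--     """Index: normalized_last_name -> [(full_name, player_id), ...]"""
--     idx = {}
--     for name, pid in name_to_id.items():
--         parts = name.strip().split()
--         if parts:
--             last = parts[-1].lower()
--             idx.setdefault(last, []).append((name, pid))
--     return idx
-- ===== SOURCE B (Python) =====
-- def _build_lastname_index(player_pool: list[str], name_to_id: dict[str, str]) -> dict[str, list[tuple[str, str]]]: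
--     """Index: normalized_last_name -> [(full_name, player_id), ...]"""
--     def key(name):
--         parts = name.strip().split()
--         return parts[-1].lower() if parts else None
--     tagged = [(key(n), n, p) for n, p in name_to_id.items()]
--     keys = []
--     for k, _, _ in tagged:
--         if k is not None and k not in keys:
--             keys.append(k)
--     return {k: [(n, p) for kk, n, p in tagged if kk == k]
--             for k in keys}
-- ===== Notes on version B (the rewrite author's own statement) =====
-- stated objective: alternative
-- what changed: B replaces A's single-pass setdefault-append accumulation with a two-phase plan: tag every item once with its normalized last-name key, collect the distinct keys in first-occurrence order, then build each bucket by filtering the tagged list for that key (comprehensions instead of in-place bucket mutation).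
import Mathlib
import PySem

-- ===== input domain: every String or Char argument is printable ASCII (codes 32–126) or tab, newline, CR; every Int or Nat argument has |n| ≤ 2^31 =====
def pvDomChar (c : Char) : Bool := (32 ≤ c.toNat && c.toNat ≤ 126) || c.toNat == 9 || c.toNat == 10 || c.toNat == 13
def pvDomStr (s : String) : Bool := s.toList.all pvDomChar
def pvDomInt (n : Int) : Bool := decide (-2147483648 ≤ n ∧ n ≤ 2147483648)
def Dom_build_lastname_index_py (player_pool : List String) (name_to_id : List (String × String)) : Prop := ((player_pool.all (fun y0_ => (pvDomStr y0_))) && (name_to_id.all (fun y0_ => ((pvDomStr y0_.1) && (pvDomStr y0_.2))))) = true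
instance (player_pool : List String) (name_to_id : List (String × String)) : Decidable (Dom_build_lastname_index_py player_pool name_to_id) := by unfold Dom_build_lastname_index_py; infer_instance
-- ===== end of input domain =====

-- B builds the index in two phases (distinct keys in first-occurrence order, then one filter
-- per key) instead of A's single-pass setdefault-append accumulation; objective: alternative.

-- ===== PORT A =====
-- shared transcription of the identical Python key expression of A and B:
-- `parts = name.strip().split(); parts[-1].lower() if parts else None`
def pvLastKey? (name : String) : Option String :=
  match PySem.List.pyGet? (PySem.Str.split₀ (PySem.Str.strip name)) (-1) with
  | none => none
  | some last => some (PySem.Str.lower last)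

-- idx.setdefault(last, []).append((name, pid)) on an insertion-ordered assoc list
def pvSetdefaultAppend : List (String × List (String × String)) → String →
    (String × String) → List (String × List (String × String))
  | [], k, v => [(k, [v])]
  | (k', vs) :: rest, k, v =>
      if k' = k then (k', vs ++ [v]) :: rest else (k', vs) :: pvSetdefaultAppend rest k v

-- loop body of A
def pvStepA (idx : List (String × List (String × String))) (nv : String × String) :
    List (String × List (String × String)) :=
  match pvLastKey? nv.1 with
  | none => idx
  | some last => pvSetdefaultAppend idx last nv

def build_lastname_index_py (player_pool : List String) (name_to_id : List (String × String)) : List (String × List (String × String)) :=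
  name_to_id.foldl pvStepA []

-- ===== PORT B =====
def build_lastname_index_py_alt (player_pool : List String) (name_to_id : List (String × String)) : List (String × List (String × String)) :=
  let tagged := name_to_id.map (fun nv => (pvLastKey? nv.1, nv))
  let keys := tagged.foldl
    (fun ks t => match t.1 with
      | none => ks
      | some k => if k ∈ ks then ks else ks ++ [k]) []
  keys.map (fun k =>
    (k, (tagged.filter (fun t => decide (t.1 = some k))).map (fun t => t.2)))

-- ===== PRECONDITION & SPEC =====
def Spec_build_lastname_index_py (player_pool : List String) (name_to_id : List (String × String)) (out : List (String × List (String × String))) : Prop := out = build_lastname_index_py_alt player_pool name_to_id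
instance (player_pool : List String) (name_to_id : List (String × String)) (out : List (String × List (String × String))) : Decidable (Spec_build_lastname_index_py player_pool name_to_id out) := by unfold Spec_build_lastname_index_py; infer_instance

-- ===== CLAIM (what is proved, stated in full; the proofs are below) =====
def Claim_equal_build_lastname_index_py : Prop := ∀ (player_pool : List String) (name_to_id : List (String × String)), Dom_build_lastname_index_py player_pool name_to_id → Spec_build_lastname_index_py player_pool name_to_id (build_lastname_index_py player_pool name_to_id)

-- ===== LEMMAS AND PROOFS =====

-- abstract form of B's first-phase loop body, used only by the proofs
def pvStepK (ks : List String) (nv : String × String) : List String :=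
  match pvLastKey? nv.1 with
  | none => ks
  | some k => if k ∈ ks then ks else ks ++ [k]

def pvK (l : List (String × String)) : List String := l.foldl pvStepK []

def pvF (l : List (String × String)) (k : String) : List (String × String) :=
  l.filter (fun nv => decide (pvLastKey? nv.1 = some k))

def pvG (l : List (String × String)) : List (String × List (String × String)) :=
  (pvK l).map (fun k => (k, pvF l k))

theorem pvStepK_none (ks : List String) (nv : String × String)
    (h : pvLastKey? nv.1 = none) : pvStepK ks nv = ks := by
  unfold pvStepK; rw [h]

theorem pvStepK_some (ks : List String) (nv : String × String) (k : String)
    (h : pvLastKey? nv.1 = some k) : pvStepK ks nv = if k ∈ ks then ks else ks ++ [k] := by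
  unfold pvStepK; rw [h]

theorem pvStepA_none (idx : List (String × List (String × String))) (nv : String × String)
    (h : pvLastKey? nv.1 = none) : pvStepA idx nv = idx := by
  unfold pvStepA; rw [h]

theorem pvStepA_some (idx : List (String × List (String × String))) (nv : String × String)
    (k : String) (h : pvLastKey? nv.1 = some k) :
    pvStepA idx nv = pvSetdefaultAppend idx k nv := by
  unfold pvStepA; rw [h]

theorem pvK_mem_mono (l : List (String × String)) (ks : List String) (k : String)
    (h : k ∈ ks) : k ∈ l.foldl pvStepK ks := by
  induction l generalizing ks with
  | nil => exact h
  | cons nv t ih =>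
      rw [List.foldl_cons]
      refine ih _ ?_
      cases hkey : pvLastKey? nv.1 with
      | none => rw [pvStepK_none ks nv hkey]; exact h
      | some k' =>
          rw [pvStepK_some ks nv k' hkey]
          by_cases hm : k' ∈ ks
          · rw [if_pos hm]; exact h
          · rw [if_neg hm]; exact List.mem_append.mpr (Or.inl h)

theorem pvK_mem_of (l : List (String × String)) (ks : List String) (nv : String × String)
    (hnv : nv ∈ l) (k : String) (hk : pvLastKey? nv.1 = some k) : k ∈ l.foldl pvStepK ks := by
  induction l generalizing ks with
  | nil => cases hnv
  | cons x t ih =>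
      rw [List.foldl_cons]
      rcases List.mem_cons.mp hnv with he | hnv
      · subst he
        refine pvK_mem_mono t _ k ?_
        rw [pvStepK_some ks nv k hk]
        by_cases hm : k ∈ ks
        · rw [if_pos hm]; exact hm
        · rw [if_neg hm]; exact List.mem_append.mpr (Or.inr (List.mem_singleton.mpr rfl))
      · exact ih _ hnv

theorem pvK_nodup (l : List (String × String)) (ks : List String) (h : ks.Nodup) :
    (l.foldl pvStepK ks).Nodup := by
  induction l generalizing ks with
  | nil => exact h
  | cons nv t ih =>
      rw [List.foldl_cons]
      refine ih _ ?_
      cases hkey : pvLastKey? nv.1 with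
      | none => rw [pvStepK_none ks nv hkey]; exact h
      | some k =>
          rw [pvStepK_some ks nv k hkey]
          by_cases hm : k ∈ ks
          · rw [if_pos hm]; exact h
          · rw [if_neg hm, List.nodup_append]
            refine ⟨h, List.nodup_singleton k, ?_⟩
            intro a ha b hb
            rw [List.mem_singleton] at hb
            subst hb
            exact fun e => hm (e ▸ ha)

theorem pvF_nil (pre : List (String × String)) (k : String) (hk : k ∉ pvK pre) :
    pvF pre k = [] := by
  unfold pvF
  rw [List.filter_eq_nil_iff]
  intro nv hnv
  simp only [decide_eq_true_eq]
  intro hkey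
  exact hk (pvK_mem_of pre [] nv hnv k hkey)

theorem pvSetdefaultAppend_map (ks : List String) (g : String → List (String × String))
    (k0 : String) (nv : String × String) (hnd : ks.Nodup) :
    pvSetdefaultAppend (ks.map fun k => (k, g k)) k0 nv =
      if k0 ∈ ks then ks.map (fun k => (k, if k = k0 then g k ++ [nv] else g k))
      else (ks.map fun k => (k, g k)) ++ [(k0, [nv])] := by
  induction ks with
  | nil => simp [pvSetdefaultAppend]
  | cons h t ih =>
      rcases List.nodup_cons.mp hnd with ⟨hht, hnt⟩
      by_cases hk : h = k0
      · subst hk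
        rw [if_pos List.mem_cons_self]
        have hL : pvSetdefaultAppend ((h, g h) :: t.map (fun k => (k, g k))) h nv
            = (h, g h ++ [nv]) :: t.map (fun k => (k, g k)) := by
          simp only [pvSetdefaultAppend]
          simp
        rw [List.map_cons, hL, List.map_cons, if_pos rfl]
        congr 1
        refine (List.map_congr_left ?_).symm
        intro k hkt
        have hne : k ≠ h := fun e => hht (e ▸ hkt)
        rw [if_neg hne]
      · have hL : pvSetdefaultAppend ((h, g h) :: t.map (fun k => (k, g k))) k0 nv
            = (h, g h) :: pvSetdefaultAppend (t.map (fun k => (k, g k))) k0 nv := by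
          simp only [pvSetdefaultAppend]
          rw [if_neg hk]
        rw [List.map_cons, hL, ih hnt]
        by_cases hm : k0 ∈ t
        · rw [if_pos hm, if_pos (List.mem_cons.mpr (Or.inr hm)), List.map_cons, if_neg hk]
        · have hnm : k0 ∉ (h :: t) := by
            intro hc
            rcases List.mem_cons.mp hc with he | ht'
            · exact hk he.symm
            · exact hm ht'
          rw [if_neg hm, if_neg hnm]
          rfl

theorem pvStep_G (pre : List (String × String)) (nv : String × String) :
    pvStepA (pvG pre) nv = pvG (pre ++ [nv]) := by
  have hK : pvK (pre ++ [nv]) = pvStepK (pvK pre) nv := by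
    unfold pvK
    rw [List.foldl_append, List.foldl_cons, List.foldl_nil]
  have hF : ∀ k, pvF (pre ++ [nv]) k =
      pvF pre k ++ (if pvLastKey? nv.1 = some k then [nv] else []) := by
    intro k
    unfold pvF
    rw [List.filter_append]
    by_cases h : pvLastKey? nv.1 = some k
    · simp [h]
    · simp [h]
  cases hkey : pvLastKey? nv.1 with
  | none =>
      rw [pvStepA_none _ nv hkey]
      unfold pvG
      rw [hK, pvStepK_none _ nv hkey]
      refine List.map_congr_left ?_
      intro k _
      rw [hF k, hkey]
      simp
  | some k0 =>
      rw [pvStepA_some _ nv k0 hkey]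
      unfold pvG
      rw [hK, pvStepK_some _ nv k0 hkey]
      rw [pvSetdefaultAppend_map (pvK pre) (pvF pre) k0 nv (pvK_nodup pre [] List.nodup_nil)]
      by_cases hm : k0 ∈ pvK pre
      · rw [if_pos hm, if_pos hm]
        refine List.map_congr_left ?_
        intro k _
        rw [hF k, hkey]
        by_cases hk : k = k0
        · subst hk
          simp
        · have hne : ¬ (some k0 = some k) := fun e => hk (Option.some.inj e).symm
          rw [if_neg hk, if_neg hne]
          simp
      · rw [if_neg hm, if_neg hm, List.map_append, List.map_cons, List.map_nil]
        have h2 : pvF (pre ++ [nv]) k0 = [nv] := by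
          rw [hF k0, hkey, pvF_nil pre k0 hm]
          simp
        have h1 : List.map (fun k => ((k, pvF pre k) : String × List (String × String))) (pvK pre)
            = List.map (fun k => (k, pvF (pre ++ [nv]) k)) (pvK pre) := by
          refine List.map_congr_left ?_
          intro k hkK
          rw [hF k, hkey]
          have hk : k ≠ k0 := fun e => hm (e ▸ hkK)
          have hne : ¬ (some k0 = some k) := fun e => hk (Option.some.inj e).symm
          rw [if_neg hne]
          simp
        rw [h2, ← h1]

theorem pvMain (l pre : List (String × String)) :
    l.foldl pvStepA (pvG pre) = pvG (pre ++ l) := by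
  induction l generalizing pre with
  | nil => simp
  | cons nv t ih =>
      rw [List.foldl_cons, pvStep_G pre nv, ih (pre ++ [nv])]
      simp

theorem pvAlt_eq_G (player_pool : List String) (name_to_id : List (String × String)) :
    build_lastname_index_py_alt player_pool name_to_id = pvG name_to_id := by
  unfold build_lastname_index_py_alt pvG pvK pvF
  simp only [List.foldl_map, List.filter_map, List.map_map]
  have hproj : ((fun (t : Option String × String × String) => t.2) ∘
      (fun (nv : String × String) => (pvLastKey? nv.1, nv))) = fun nv => nv := by
    funext nv
    rfl
  have hpred : ∀ k : String, ((fun (t : Option String × String × String) => decide (t.1 = some k)) ∘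
      (fun (nv : String × String) => (pvLastKey? nv.1, nv)))
      = fun nv => decide (pvLastKey? nv.1 = some k) := by
    intro k
    funext nv
    simp [Function.comp]
  simp only [hproj, hpred, List.map_id']
  rfl

-- ===== VERDICT (by name: the statement is the Claim_ definition above) =====
theorem build_lastname_index_py_spec : Claim_equal_build_lastname_index_py := by
  intro player_pool name_to_id _
  unfold Spec_build_lastname_index_py build_lastname_index_py
  have h0 : pvG [] = ([] : List (String × List (String × String))) := rfl
  have h := pvMain name_to_id []
  rw [h0, List.nil_append] at h
  rw [h, pvAlt_eq_G player_pool name_to_id]
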